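-- pv_equiv track=rewrite | github.com/jantuomi/ATK16 | src/ast_compiler.py | compact_target_mov_pattern
-- ===== SOURCE A (Python) =====
-- def compact_target_mov_pattern(asm: list[list[str]]) -> list[list[str]]:
--   ops_with_target = ["ldi", "ldr", "add", "sub", "addi", "subi", "and", "or", "xor", "sll", "slr", "sar", "slli", "slri", "sari", "inc", "dec", "mov", "ali", "alr", "lpc"]
--   i = 0
--   result: list[list[str]] = []
--   while i < len(asm):
--     current = asm[i]
--     next = asm[i + 1] if i + 1 < len(asm) else None
--     i += 1
--     if current[0].startswith("@") or next is None:
--       result.append(current)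
--       continue
--
--     if current[0] in ops_with_target and next[0] == "mov":
--
--       op_op, op_operands, op_target_reg = current[0], current[1:len(current) - 1], current[len(current) - 1]
--       mov_from_reg, mov_to_reg = next[1], next[2]
--
--       if op_target_reg == mov_from_reg:
--         ret = [op_op, *op_operands, mov_to_reg]
--         result.append(ret)
--         i += 1
--         continue
--
--     result.append(current)
--
--   return result
-- ===== SOURCE B (Python) =====
-- def compact_target_mov_pattern(asm: list[list[str]]) -> list[list[str]]:
--   ops_with_target = {"ldi", "ldr", "add", "sub", "addi", "subi", "and", "or", "xor", "sll", "slr", "sar", "slli", "slri", "sari", "inc", "dec", "mov", "ali", "alr", "lpc"}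
--   result: list[list[str]] = []
--   just_fused = False
--   for ins in asm:
--     if (not just_fused and len(ins) == 3 and ins[0] == "mov" and result
--         and result[-1][0] in ops_with_target and result[-1][-1] == ins[1]):
--       prev = result[-1]
--       result[-1] = [prev[0], *prev[1:-1], ins[2]]
--       just_fused = True
--     else:
--       result.append(ins)
--       just_fused = False
--   return result
-- ===== Notes on version B (the rewrite author's own statement) =====
-- stated objective: simpler
-- what changed: Replaces the index-driven while loop that peeks ahead at asm[i+1] and skips an index after a fuse by a single left-to-right fold that appends each instruction and, guarded by a just_fused flag, folds a 3-field mov back into the previously appended op instead of looking ahead.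
-- outside the precondition, e.g. on compact_target_mov_pattern([['@a'], ['mov']]): A returns [['@a'], ['mov']], B returns [['@a'], ['mov']]
import Mathlib
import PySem

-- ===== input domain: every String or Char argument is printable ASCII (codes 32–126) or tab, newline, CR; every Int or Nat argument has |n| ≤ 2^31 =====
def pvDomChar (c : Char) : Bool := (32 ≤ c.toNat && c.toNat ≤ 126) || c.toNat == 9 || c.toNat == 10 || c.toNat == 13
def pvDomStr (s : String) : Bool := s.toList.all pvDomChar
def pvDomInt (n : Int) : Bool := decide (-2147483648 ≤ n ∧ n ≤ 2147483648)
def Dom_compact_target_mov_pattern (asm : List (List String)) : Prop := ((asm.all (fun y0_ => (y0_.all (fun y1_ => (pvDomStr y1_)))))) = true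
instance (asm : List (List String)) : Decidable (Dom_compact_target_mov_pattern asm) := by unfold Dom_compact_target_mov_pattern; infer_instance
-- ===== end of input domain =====

-- B replaces A's index-driven look-ahead while loop (which skips an index after a fuse) by a
-- single fold that folds a mov back into the previously appended op, guarded by a just-fused flag;
-- objective: simpler.

-- ===== PORT A =====
def pvOpsWithTarget : List String := ["ldi", "ldr", "add", "sub", "addi", "subi", "and", "or", "xor", "sll", "slr", "sar", "slli", "slri", "sari", "inc", "dec", "mov", "ali", "alr", "lpc"]

-- transliteration of A's while loop: each iteration consumes `current` and, on a fuse, also `next`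
def pvGoA : List (List String) → List (List String)
  | [] => []
  | [current] => [current]                    -- next is None → append current
  | current :: next :: rest =>
    if PySem.Str.startswith (PySem.List.pyGetD current 0 "") "@" then
      current :: pvGoA (next :: rest)
    else if pvOpsWithTarget.contains (PySem.List.pyGetD current 0 "") &&
        (PySem.List.pyGetD next 0 "" == "mov") then
      -- op_operands = current[1:len(current)-1], op_target_reg = current[len(current)-1],
      -- mov_from_reg = next[1], mov_to_reg = next[2]
      if (PySem.List.pyGetD current (PySem.List.len current - 1) "" ==
          PySem.List.pyGetD next 1 "") then
        (PySem.List.pyGetD current 0 "" ::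
          PySem.List.slice current (some 1) (some (PySem.List.len current - 1)) ++
          [PySem.List.pyGetD next 2 ""]) :: pvGoA rest
      else
        current :: pvGoA (next :: rest)
    else
      current :: pvGoA (next :: rest)

def compact_target_mov_pattern (asm : List (List String)) : List (List String) := pvGoA asm

-- ===== PORT B =====
-- one fold step of Source B's loop; the result list is kept reversed (append = cons)
def pvStepB (st : List (List String) × Bool) (ins : List String) : List (List String) × Bool :=
  let prev := st.1.headD []
  if !st.2 && ins.length == 3 && (PySem.List.pyGetD ins 0 "" == "mov") && !st.1.isEmpty
      && pvOpsWithTarget.contains (PySem.List.pyGetD prev 0 "")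
      && (PySem.List.pyGetD prev (-1) "" == PySem.List.pyGetD ins 1 "") then
    ((PySem.List.pyGetD prev 0 "" :: PySem.List.slice prev (some 1) (some (-1)) ++ [PySem.List.pyGetD ins 2 ""]) :: st.1.tail, true)
  else
    (ins :: st.1, false)

def compact_target_mov_pattern_alt (asm : List (List String)) : List (List String) :=
  ((asm.foldl pvStepB ([], false)).1).reverse

-- ===== PRECONDITION & SPEC =====
-- Pre_ excludes lists containing a malformed instruction (an empty one, or a mov-headed one
-- without exactly 3 fields): A raises IndexError on empty instructions and on short movs it
-- inspects, and silently drops the extra operands of an over-long mov it fuses; B treats any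
-- such mov as a plain instruction.
def Pre_compact_target_mov_pattern (asm : List (List String)) : Prop :=
  ∀ ins ∈ asm, ins ≠ [] ∧ (PySem.List.pyGetD ins 0 "" = "mov" → ins.length = 3)
instance (asm : List (List String)) : Decidable (Pre_compact_target_mov_pattern asm) := by unfold Pre_compact_target_mov_pattern; infer_instance

def pvWitness_compact_target_mov_pattern : List (List String) :=
  [["addi", "r1", "1", "r2"], ["mov", "r2", "r3"]]

def Spec_compact_target_mov_pattern (asm : List (List String)) (out : List (List String)) : Prop := out = compact_target_mov_pattern_alt asm
instance (asm : List (List String)) (out : List (List String)) : Decidable (Spec_compact_target_mov_pattern asm out) := by unfold Spec_compact_target_mov_pattern; infer_instance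

-- ===== CLAIM (what is proved, stated in full; the proofs are below) =====
def Claim_equal_compact_target_mov_pattern : Prop := ∀ (asm : List (List String)), Dom_compact_target_mov_pattern asm → Pre_compact_target_mov_pattern asm → Spec_compact_target_mov_pattern asm (compact_target_mov_pattern asm)

-- ===== LEMMAS AND PROOFS =====

-- literal-index lookups on a 3-element literal list
lemma pvGet0 (a b d : String) : PySem.List.pyGetD [a, b, d] 0 "" = a := rfl
lemma pvGet1 (a b d : String) : PySem.List.pyGetD [a, b, d] 1 "" = b := rfl
lemma pvGet2 (a b d : String) : PySem.List.pyGetD [a, b, d] 2 "" = d := rfl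

-- no opcode of the table starts with "@"
lemma pvOps_no_at (c0 : String) (h : pvOpsWithTarget.contains c0 = true) :
    PySem.Str.startswith c0 "@" = false := by
  simp [pvOpsWithTarget] at h
  rcases h with rfl|rfl|rfl|rfl|rfl|rfl|rfl|rfl|rfl|rfl|rfl|rfl|rfl|rfl|rfl|rfl|rfl|rfl|rfl|rfl|rfl <;> decide

-- ins[len(ins)-1] = ins[-1] for nonempty ins
lemma pvLast_eq (ins : List String) (h : ins ≠ []) :
    PySem.List.pyGetD ins (PySem.List.len ins - 1) "" = PySem.List.pyGetD ins (-1) "" := by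
  have hp : 0 < ins.length := List.length_pos_iff.mpr h
  have h1 : PySem.List.len ins - 1 = ((ins.length - 1 : Nat) : Int) := by
    simp [PySem.List.len_eq]; omega
  rw [h1]
  simp [PySem.List.pyGetD, PySem.List.pyGet?_neg_one, List.getLast?_eq_getElem?]

-- ins[1:len(ins)-1] = ins[1:-1] for nonempty ins
lemma pvSlice_eq (ins : List String) (h : ins ≠ []) :
    PySem.List.slice ins (some 1) (some (PySem.List.len ins - 1)) =
      PySem.List.slice ins (some 1) (some (-1)) := by
  have hp : 0 < ins.length := List.length_pos_iff.mpr h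
  simp [PySem.List.slice, PySem.List.clampIdx, PySem.List.len_eq, h]
  omega

-- main invariant: running Source B's fold with last-appended, not-just-fused element c equals
-- emitting rev then A's recursion on (c :: xs)
lemma pvKey (n : Nat) : ∀ (xs : List (List String)) (c : List String) (rev : List (List String)),
    xs.length = n → Pre_compact_target_mov_pattern (c :: xs) →
    ((xs.foldl pvStepB (c :: rev, false)).1).reverse = rev.reverse ++ pvGoA (c :: xs) := by
  induction n using Nat.strong_induction_on with
  | _ n ih =>
    intro xs c rev hlen hpre
    obtain ⟨hc0, hcmov⟩ := hpre c (by simp)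
    match xs with
    | [] => simp [pvGoA]
    | x :: t =>
      obtain ⟨hx0, hxmov⟩ := hpre x (by simp)
      have hlt : t.length + 1 = n := by simpa using hlen
      rw [List.foldl_cons]
      by_cases hs : PySem.Str.startswith (PySem.List.pyGetD c 0 "") "@" = true
      · -- c is a label line: both append c plainly
        have hmem : PySem.List.pyGetD c 0 "" ∉ pvOpsWithTarget := by
          intro hm
          have hcc : pvOpsWithTarget.contains (PySem.List.pyGetD c 0 "") = true := by simpa using hm
          rw [pvOps_no_at _ hcc] at hs
          exact Bool.false_ne_true hs
        have hstep : pvStepB (c :: rev, false) x = (x :: c :: rev, false) := by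
          simp [pvStepB, hmem]
        have hgo : pvGoA (c :: x :: t) = c :: pvGoA (x :: t) := by
          simp only [pvGoA]
          rw [if_pos hs]
        rw [hstep,
          ih t.length (by omega) t x (c :: rev) rfl (fun i hi => hpre i (by simp [hi])),
          hgo]
        simp
      · rw [Bool.not_eq_true] at hs
        by_cases hb : (pvOpsWithTarget.contains (PySem.List.pyGetD c 0 "") &&
            (PySem.List.pyGetD x 0 "" == "mov")) = true
        · -- op followed by a mov head: x must be exactly ["mov", x1, x2]
          simp only [Bool.and_eq_true, beq_iff_eq] at hb
          obtain ⟨hcont, hxhead⟩ := hb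
          have hmem : PySem.List.pyGetD c 0 "" ∈ pvOpsWithTarget := by simpa using hcont
          obtain ⟨x0, x1, x2, rfl⟩ : ∃ a b d, x = [a, b, d] := by
            have hxlen : x.length = 3 := hxmov hxhead
            rcases x with _ | ⟨a, _ | ⟨b, _ | ⟨d, _ | _⟩⟩⟩ <;> simp_all
          have hx0v : x0 = "mov" := by simpa [PySem.List.pyGetD_zero_cons] using hxhead
          subst hx0v
          by_cases heq : PySem.List.pyGetD c (PySem.List.len c - 1) "" = x1
          · -- fuse
            have hfrom : PySem.List.pyGetD c (-1) "" = x1 := by rw [← pvLast_eq c hc0]; exact heq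
            have hstep : pvStepB (c :: rev, false) ["mov", x1, x2] =
                ((PySem.List.pyGetD c 0 "" :: PySem.List.slice c (some 1) (some (-1)) ++ [x2]) :: rev, true) := by
              simp [pvStepB, pvGet1, pvGet2, hmem, hfrom]
            have hfuse : pvGoA (c :: ["mov", x1, x2] :: t) =
                (PySem.List.pyGetD c 0 "" :: PySem.List.slice c (some 1) (some (-1)) ++ [x2]) :: pvGoA t := by
              simp only [pvGoA]
              rw [if_neg (by rw [hs]; exact Bool.false_ne_true),
                if_pos (by rw [hcont, pvGet0]; simp),
                if_pos (by rw [pvGet1, heq]; simp),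
                pvGet2, pvSlice_eq c hc0]
            rw [hstep, hfuse]
            match t with
            | [] => simp [pvGoA]
            | y :: t' =>
              rw [List.foldl_cons]
              have hstep2 : pvStepB
                  ((PySem.List.pyGetD c 0 "" :: PySem.List.slice c (some 1) (some (-1)) ++ [x2]) :: rev, true) y =
                  (y :: (PySem.List.pyGetD c 0 "" :: PySem.List.slice c (some 1) (some (-1)) ++ [x2]) :: rev, false) := by
                simp [pvStepB]
              rw [hstep2,
                ih t'.length (by simp at hlt; omega) t' y
                  ((PySem.List.pyGetD c 0 "" :: PySem.List.slice c (some 1) (some (-1)) ++ [x2]) :: rev) rfl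
                  (fun i hi => hpre i (by simp [hi]))]
              simp
          · -- target ≠ from: append c plainly
            have hfrom : ¬ PySem.List.pyGetD c (-1) "" = x1 := by rw [← pvLast_eq c hc0]; exact heq
            have hstep : pvStepB (c :: rev, false) ["mov", x1, x2] =
                (["mov", x1, x2] :: c :: rev, false) := by
              simp [pvStepB, pvGet1, hfrom]
            have hgo : pvGoA (c :: ["mov", x1, x2] :: t) = c :: pvGoA (["mov", x1, x2] :: t) := by
              simp only [pvGoA]
              rw [if_neg (by rw [hs]; exact Bool.false_ne_true),
                if_pos (by rw [hcont, pvGet0]; simp),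
                if_neg (by rw [pvGet1]; simpa using heq)]
            rw [hstep,
              ih t.length (by omega) t ["mov", x1, x2] (c :: rev) rfl
                (fun i hi => hpre i (by simp [hi])),
              hgo]
            simp
        · -- not an op+mov pair: append c plainly
          have hstep : pvStepB (c :: rev, false) x = (x :: c :: rev, false) := by
            by_cases hxm : PySem.List.pyGetD x 0 "" = "mov"
            · have hmem : PySem.List.pyGetD c 0 "" ∉ pvOpsWithTarget := by
                intro hm
                have hcc : pvOpsWithTarget.contains (PySem.List.pyGetD c 0 "") = true := by simpa using hm
                simp [hxm] at hb
                exact hb hm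
              simp [pvStepB, hmem]
            · simp [pvStepB, hxm]
          have hgo : pvGoA (c :: x :: t) = c :: pvGoA (x :: t) := by
            simp only [pvGoA]
            rw [if_neg (by rw [hs]; exact Bool.false_ne_true), if_neg hb]
          rw [hstep,
            ih t.length (by omega) t x (c :: rev) rfl (fun i hi => hpre i (by simp [hi])),
            hgo]
          simp

-- ===== VERDICT (by name: the statement is the Claim_ definition above) =====
theorem compact_target_mov_pattern_spec : Claim_equal_compact_target_mov_pattern := by
  intro asm _ hpre
  unfold Spec_compact_target_mov_pattern compact_target_mov_pattern compact_target_mov_pattern_alt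
  match asm with
  | [] => rfl
  | c :: t =>
    rw [List.foldl_cons]
    have hstep : pvStepB ([], false) c = ([c], false) := by simp [pvStepB]
    rw [hstep]
    have := pvKey t.length t c [] rfl hpre
    simpa using this.symm
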